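-- pv_equiv track=rewrite | github.com/FreakStudioCN/pages | ui/pylibs/silicon5351.py | approximate_fraction
-- ===== SOURCE A (Python) =====
-- def approximate_fraction(n, d, max_denom):
--
--     for name, value in zip(["n", "d", "max_denom"], [n, d, max_denom]):
--         if not isinstance(value, int):
--             raise TypeError(f"{name} must be an int")
--
--     if d == 0:
--         raise ValueError("d (denominator) cannot be 0")
--     if max_denom <= 0:
--         raise ValueError("max_denom must be positive")
--
--     denom = d
--     if denom > max_denom:
--         num = n
--         p0 = 0
--         q0 = 1
--         p1 = 1
--         q1 = 0
--         while denom != 0: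
--             a = num // denom
--             b = num % denom
--             q2 = q0 + a * q1
--             if q2 > max_denom:
--                 break
--             p2 = p0 + a * p1
--             p0 = p1
--             q0 = q1
--             p1 = p2
--             q1 = q2
--             num = denom
--             denom = b
--         n = p1
--         d = q1
--     return n, d
-- ===== SOURCE B (Python) =====
-- def approximate_fraction(n, d, max_denom):
--     for name, value in zip(["n", "d", "max_denom"], [n, d, max_denom]):
--         if not isinstance(value, int):
--             raise TypeError(f"{name} must be an int")
--     if d == 0:
--         raise ValueError("d (denominator) cannot be 0")
--     if max_denom <= 0:
--         raise ValueError("max_denom must be positive")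
--     if d <= max_denom:
--         return n, d
--     # pass 1: Euclidean process, collect the partial quotients
--     quots = []
--     num, denom = n, d
--     while denom != 0:
--         a, b = divmod(num, denom)
--         quots.append(a)
--         num, denom = denom, b
--     # pass 2: advance convergents until the denominator bound is exceeded
--     p0, q0, p1, q1 = 0, 1, 1, 0
--     for a in quots:
--         q2 = q0 + a * q1
--         if q2 > max_denom:
--             break
--         p0, q0, p1, q1 = p1, q1, p0 + a * p1, q2
--     return p1, q1
-- ===== Notes on version B (the rewrite author's own statement) =====
-- stated objective: alternative
-- what changed: B splits A's single fused while-loop into two passes: first the Euclidean algorithm collecting the list of partial quotients, then a separate fold over that list advancing the convergent pairs with the max_denom break.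
import Mathlib
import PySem

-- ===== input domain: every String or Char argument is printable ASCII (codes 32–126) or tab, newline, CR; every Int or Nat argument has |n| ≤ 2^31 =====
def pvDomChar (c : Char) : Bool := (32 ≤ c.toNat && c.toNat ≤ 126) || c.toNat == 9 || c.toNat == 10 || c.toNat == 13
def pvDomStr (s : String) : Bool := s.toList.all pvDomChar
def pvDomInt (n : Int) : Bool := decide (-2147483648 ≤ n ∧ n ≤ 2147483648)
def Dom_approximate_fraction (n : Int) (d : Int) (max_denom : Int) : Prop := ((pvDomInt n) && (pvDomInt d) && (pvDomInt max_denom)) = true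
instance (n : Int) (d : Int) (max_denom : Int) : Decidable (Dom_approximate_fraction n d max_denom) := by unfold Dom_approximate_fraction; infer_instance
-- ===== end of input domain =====

-- B splits A's fused loop into a quotient-collection pass and a convergent fold (objective: alternative decomposition).

-- ===== PORT A =====
-- A's while-loop, fuelled: within Pre_ the denominator is positive and strictly
-- decreases each iteration, so fuel d.natAbs + 1 is never exhausted.
def pvLoopA (fuel : Nat) (num denom p0 q0 p1 q1 max_denom : Int) : Int × Int :=
  match fuel with
  | 0 => (p1, q1)
  | fuel + 1 =>
    if denom ≠ 0 then
      let a := PySem.Int.floordiv num denom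
      let b := PySem.Int.mod num denom
      let q2 := q0 + a * q1
      if q2 > max_denom then (p1, q1)
      else pvLoopA fuel denom b p1 q1 (p0 + a * p1) q2 max_denom
    else (p1, q1)

def approximate_fraction (n : Int) (d : Int) (max_denom : Int) : Int × Int :=
  if d > max_denom then pvLoopA (d.natAbs + 1) n d 0 1 1 0 max_denom
  else (n, d)

-- ===== PORT B =====
-- pass 1: Euclidean process collecting partial quotients (same fuel bound)
def pvQuots (fuel : Nat) (num denom : Int) : List Int :=
  match fuel with
  | 0 => []
  | fuel + 1 =>
    if denom ≠ 0 then
      PySem.Int.floordiv num denom :: pvQuots fuel denom (PySem.Int.mod num denom)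
    else []

-- pass 2: fold over the quotients advancing the convergent pairs, breaking on q2 > max_denom
def pvConv : List Int → Int → Int → Int → Int → Int → Int × Int
  | [], _, _, p1, q1, _ => (p1, q1)
  | a :: rest, p0, q0, p1, q1, md =>
    let q2 := q0 + a * q1
    if q2 > md then (p1, q1)
    else pvConv rest p1 q1 (p0 + a * p1) q2 md

def approximate_fraction_alt (n : Int) (d : Int) (max_denom : Int) : Int × Int :=
  if d > max_denom then pvConv (pvQuots (d.natAbs + 1) n d) 0 1 1 0 max_denom
  else (n, d)

-- ===== PRECONDITION & SPEC =====
-- Pre_ excludes exactly the inputs on which A raises ValueError: d == 0 or max_denom <= 0.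
def Pre_approximate_fraction (n : Int) (d : Int) (max_denom : Int) : Prop :=
  d ≠ 0 ∧ 0 < max_denom
instance (n : Int) (d : Int) (max_denom : Int) : Decidable (Pre_approximate_fraction n d max_denom) := by unfold Pre_approximate_fraction; infer_instance

def pvWitness_approximate_fraction : Int × Int × Int := (1, 3, 2)

def Spec_approximate_fraction (n : Int) (d : Int) (max_denom : Int) (out : Int × Int) : Prop := out = approximate_fraction_alt n d max_denom
instance (n : Int) (d : Int) (max_denom : Int) (out : Int × Int) : Decidable (Spec_approximate_fraction n d max_denom out) := by unfold Spec_approximate_fraction; infer_instance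

-- ===== CLAIM (what is proved, stated in full; the proofs are below) =====
def Claim_equal_approximate_fraction : Prop := ∀ (n : Int) (d : Int) (max_denom : Int), Dom_approximate_fraction n d max_denom → Pre_approximate_fraction n d max_denom → Spec_approximate_fraction n d max_denom (approximate_fraction n d max_denom)

-- ===== LEMMAS AND PROOFS =====

-- A's fused loop equals B's fold over the quotient list, for ANY fuel.
theorem pvLoopA_eq_conv (fuel : Nat) :
    ∀ (num denom p0 q0 p1 q1 md : Int),
      pvLoopA fuel num denom p0 q0 p1 q1 md
        = pvConv (pvQuots fuel num denom) p0 q0 p1 q1 md := by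
  induction fuel with
  | zero => intro num denom p0 q0 p1 q1 md; rfl
  | succ fuel ih =>
    intro num denom p0 q0 p1 q1 md
    by_cases hd : denom = 0
    · simp [pvLoopA, pvQuots, pvConv, hd]
    · simp only [pvLoopA, pvQuots, pvConv, hd, if_pos, ne_eq, not_false_eq_true, if_true]
      by_cases hq : q0 + PySem.Int.floordiv num denom * q1 > md
      · simp [hq]
      · simp [hq, ih]

-- ===== VERDICT (by name: the statement is the Claim_ definition above) =====
theorem approximate_fraction_spec : Claim_equal_approximate_fraction := by
  intro n d md _ _
  unfold Spec_approximate_fraction approximate_fraction approximate_fraction_alt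
  by_cases h : d > md
  · simp [h, pvLoopA_eq_conv]
  · simp [h]
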